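-- pv_equiv track=rewrite | github.com/aodelta/python_utility | math/all_prime_factors.py | reduce_with_power
-- ===== SOURCE A (Python) =====
-- def reduce_with_power(diviseurs):
--     diviseurs.sort()
--     diviseurs_with_powers = []
--     diviseurs_dictionnary_powers = {}
--     for diviseur in diviseurs:
--         if diviseur in diviseurs_dictionnary_powers:
--             diviseurs_dictionnary_powers[diviseur] += 1
--         else:
--             diviseurs_dictionnary_powers[diviseur] = 1
--
--     for diviseur_keys in diviseurs_dictionnary_powers:
--         diviseurs_with_powers += [[diviseur_keys, diviseurs_dictionnary_powers[diviseur_keys]]]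
--
--     return diviseurs_with_powers
-- ===== SOURCE B (Python) =====
-- def reduce_with_power(diviseurs):
--     diviseurs.sort()
--     out = []
--     if not diviseurs:
--         return out
--     cur = diviseurs[0]
--     cnt = 1
--     for d in diviseurs[1:]:
--         if d == cur:
--             cnt += 1
--         else:
--             out.append([cur, cnt])
--             cur = d
--             cnt = 1
--     out.append([cur, cnt])
--     return out
-- ===== Notes on version B (the rewrite author's own statement) =====
-- stated objective: simpler
-- what changed: Replaces the dictionary-counting pass plus a second key-iteration pass with a single run-length pass over the sorted list (track current value and count, emit on change); no dict is built.
import Mathlib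
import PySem

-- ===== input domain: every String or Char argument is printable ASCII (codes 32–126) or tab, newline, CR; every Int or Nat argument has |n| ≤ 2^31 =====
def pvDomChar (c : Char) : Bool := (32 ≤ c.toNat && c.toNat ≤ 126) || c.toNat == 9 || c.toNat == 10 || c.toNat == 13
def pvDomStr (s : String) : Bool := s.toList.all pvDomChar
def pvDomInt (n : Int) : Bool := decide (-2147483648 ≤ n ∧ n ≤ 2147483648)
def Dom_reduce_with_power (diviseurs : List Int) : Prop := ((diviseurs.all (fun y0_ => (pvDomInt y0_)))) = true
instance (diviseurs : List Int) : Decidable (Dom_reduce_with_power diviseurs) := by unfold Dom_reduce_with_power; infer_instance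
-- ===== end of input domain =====

-- B replaces A's dict-counting pass + key-iteration pass by one run-length pass over the
-- sorted list (simpler, no dict). Both Pythons sort the argument in place; the equivalence
-- proved here is about the RETURN value (B performs the same in-place sort as A).

-- ===== PORT A =====
def reduce_with_power (diviseurs : List Int) : List (List Int) :=
  let s := PySem.List.sorted diviseurs (fun x => x) false
  let d := s.foldl
    (fun (d : PySem.Dict Int Int) diviseur =>
      if d.contains diviseur then d.modify diviseur 0 (· + 1) else d.insert diviseur 1)
    PySem.Dict.empty
  d.keys.foldl (fun out k => out ++ [[k, d.getD k 0]]) []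

-- ===== PORT B =====
def reduce_with_power_alt (diviseurs : List Int) : List (List Int) :=
  match PySem.List.sorted diviseurs (fun x => x) false with
  | [] => []
  | x :: xs =>
    let st := xs.foldl
      (fun (st : List (List Int) × Int × Int) d =>
        if d = st.2.1 then (st.1, st.2.1, st.2.2 + 1)
        else (st.1 ++ [[st.2.1, st.2.2]], d, (1 : Int)))
      ([], x, (1 : Int))
    st.1 ++ [[st.2.1, st.2.2]]

-- ===== PRECONDITION & SPEC =====
def Spec_reduce_with_power (diviseurs : List Int) (out : List (List Int)) : Prop := out = reduce_with_power_alt diviseurs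
instance (diviseurs : List Int) (out : List (List Int)) : Decidable (Spec_reduce_with_power diviseurs out) := by unfold Spec_reduce_with_power; infer_instance

-- ===== CLAIM (what is proved, stated in full; the proofs are below) =====
def Claim_equal_reduce_with_power : Prop := ∀ (diviseurs : List Int), Dom_reduce_with_power diviseurs → Spec_reduce_with_power diviseurs (reduce_with_power diviseurs)

-- ===== LEMMAS AND PROOFS =====

-- A's counting step equals the Counter step (on a missing key, modify inserts f(dflt) = 1).
theorem stepA_eq_modify (d : PySem.Dict Int Int) (x : Int) :
    (if d.contains x then d.modify x 0 (· + 1) else d.insert x 1) = d.modify x 0 (· + 1) := by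
  by_cases h : d.contains x = true
  · simp [h]
  · simp only [Bool.not_eq_true] at h
    simp [h, PySem.Dict.modify, PySem.Dict.getD_of_not_contains (h := h)]

theorem discard_eq_filter (s : PySem.Set Int) (x : Int) :
    PySem.Set.discard s x = s.filter (fun y => y ≠ x) := by
  simp only [PySem.Set.discard]
  apply List.filter_congr
  intro y _
  simp [beq_eq_decide]

-- B's run-length loop, characterised on a sorted tail whose elements are ≥ the current value.
theorem bLoop (xs : List Int) (out : List (List Int)) (k n : Int)
    (hsort : xs.Pairwise (· ≤ ·)) (hge : ∀ x ∈ xs, k ≤ x) :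
    (xs.foldl
      (fun (st : List (List Int) × Int × Int) d =>
        if d = st.2.1 then (st.1, st.2.1, st.2.2 + 1)
        else (st.1 ++ [[st.2.1, st.2.2]], d, (1 : Int)))
      (out, k, n)).1
    ++ [[(xs.foldl
      (fun (st : List (List Int) × Int × Int) d =>
        if d = st.2.1 then (st.1, st.2.1, st.2.2 + 1)
        else (st.1 ++ [[st.2.1, st.2.2]], d, (1 : Int)))
      (out, k, n)).2.1,
        (xs.foldl
      (fun (st : List (List Int) × Int × Int) d =>
        if d = st.2.1 then (st.1, st.2.1, st.2.2 + 1)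
        else (st.1 ++ [[st.2.1, st.2.2]], d, (1 : Int)))
      (out, k, n)).2.2]]
    = out ++ [k, n + (xs.count k : Int)]
        :: ((PySem.Set.ofList xs).filter (fun y => y ≠ k)).map
            (fun y => [y, (xs.count y : Int)]) := by
  induction xs generalizing out k n with
  | nil => simp [PySem.Set.ofList]
  | cons y ys ih =>
    rw [List.pairwise_cons] at hsort
    obtain ⟨hy_le, hys⟩ := hsort
    by_cases hyk : y = k
    · subst hyk
      simp only [List.foldl_cons]
      simp only [if_true]
      rw [ih _ _ _ hys hy_le]
      rw [PySem.Set.ofList_cons, discard_eq_filter]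
      simp only [List.count_cons, List.filter_cons]
      simp [List.filter_filter]
      constructor
      · ring
      · intro a _ h h2
        exact h h2.symm
    · have hky : k < y := lt_of_le_of_ne (hge y (List.mem_cons_self)) (fun h => hyk h.symm)
      simp only [List.foldl_cons]
      rw [if_neg hyk, ih _ _ _ hys hy_le]
      have hkny : k ∉ ys := fun h => absurd (hy_le k h) (not_le.mpr hky)
      have hkcons : k ∉ (y :: ys) := by
        intro h
        rcases List.mem_cons.mp h with h | h
        · exact (ne_of_lt hky) h
        · exact hkny h
      rw [PySem.Set.ofList_cons, discard_eq_filter]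
      rw [List.count_eq_zero.mpr hkcons]
      simp only [List.count_cons, List.filter_cons, List.filter_filter]
      rw [if_pos (by simp [hyk])]
      have hfil : List.filter (fun a => decide (a ≠ k) && decide (a ≠ y)) (PySem.Set.ofList ys)
          = List.filter (fun a => decide (a ≠ y)) (PySem.Set.ofList ys) := by
        apply List.filter_congr
        intro a ha
        have hay : a ∈ ys := (PySem.Set.mem_ofList _ _).mp ha
        have hak : a ≠ k := ne_of_gt (lt_of_lt_of_le hky (hy_le a hay))
        simp [hak]
      rw [hfil, List.map_cons]
      have hmap : ∀ (L : List Int), List.map (fun y_1 => ([y_1, ((List.count y_1 ys + if (y == y_1) = true then 1 else 0 : ℕ) : ℤ)] : List Int)) (List.filter (fun a => decide (a ≠ y)) L)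
          = List.map (fun y_1 => ([y_1, (List.count y_1 ys : ℤ)] : List Int)) (List.filter (fun a => decide (a ≠ y)) L) := by
        intro L
        apply List.map_congr_left
        intro a ha
        have : ¬a = y := by
          have := (List.mem_filter.mp ha).2
          simpa using this
        have hya : (y == a) = false := by
          simp only [beq_eq_false_iff_ne]
          exact fun h => this h.symm
        simp [hya]
      rw [hmap]
      simp [List.append_assoc]
      ring

-- A's two loops compute the per-key counts of s, listed in first-occurrence order.
theorem aSide (s : List Int) :
    (let d := s.foldl
        (fun (d : PySem.Dict Int Int) diviseur =>
          if d.contains diviseur then d.modify diviseur 0 (· + 1) else d.insert diviseur 1)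
        PySem.Dict.empty;
      d.keys.foldl (fun out k => out ++ [[k, d.getD k 0]]) [])
    = (PySem.Set.ofList s).map (fun k => [k, (s.count k : Int)]) := by
  have hA : s.foldl
      (fun (d : PySem.Dict Int Int) diviseur =>
        if d.contains diviseur then d.modify diviseur 0 (· + 1) else d.insert diviseur 1)
      PySem.Dict.empty = PySem.Dict.counter s := by
    rw [PySem.Dict.counter_eq_foldl]
    apply PySem.List.foldl_congr_mem
    intro d x _
    exact stepA_eq_modify d x
  simp only [hA, PySem.List.foldl_append_singleton_eq_map, List.nil_append]
  simp [PySem.Dict.keys_counter, PySem.Dict.getD_counter]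

-- ===== VERDICT (by name: the statement is the Claim_ definition above) =====
theorem reduce_with_power_spec : Claim_equal_reduce_with_power := by
  intro diviseurs _
  unfold Spec_reduce_with_power reduce_with_power reduce_with_power_alt
  rw [aSide]
  have hpw : (PySem.List.sorted diviseurs (fun x => x) false).Pairwise (· ≤ ·) := by
    simpa using PySem.List.sorted_pairwise diviseurs (fun x => x)
  cases hm : PySem.List.sorted diviseurs (fun x => x) false with
  | nil => simp
  | cons x xs =>
    rw [hm] at hpw
    rw [List.pairwise_cons] at hpw
    dsimp only
    rw [bLoop xs [] x 1 hpw.2 hpw.1]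
    rw [PySem.Set.ofList_cons, discard_eq_filter, List.map_cons, List.nil_append]
    congr 1
    · simp
      ring
    · apply List.map_congr_left
      intro a ha
      have hax : ¬a = x := by simpa using (List.mem_filter.mp ha).2
      have hxa : (x == a) = false := by
        simp only [beq_eq_false_iff_ne]
        exact Ne.symm hax
      simp [List.count_cons, hxa]
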